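-- pv_equiv track=rewrite | github.com/HanGyeolee/korean-conversation | principler.py | getVerb
-- ===== SOURCE A (Python) =====
-- def getVerb(morpheme):
--     #try:
--     for v in reversed(morpheme):
--         if 'VV' in v:
--             return v
--     for v in reversed(morpheme):
--         if 'VA' in v:
--             return v
--     for v in reversed(morpheme):
--         if 'V' in v:
--             return v
--     #except:
--     #    pass
--     return ''
-- ===== SOURCE B (Python) =====
-- def getVerb(morpheme):
--     last_vv = last_va = last_v = ''
--     for x in morpheme:
--         if 'VV' in x:
--             last_vv = x
--         if 'VA' in x:
--             last_va = x
--         if 'V' in x: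
--             last_v = x
--     return last_vv or last_va or last_v
-- ===== Notes on version B (the rewrite author's own statement) =====
-- stated objective: simpler
-- what changed: Replaces three separate reversed scans with one forward pass that tracks the last element matching each of the three priority tags, then returns by priority.
import Mathlib
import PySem

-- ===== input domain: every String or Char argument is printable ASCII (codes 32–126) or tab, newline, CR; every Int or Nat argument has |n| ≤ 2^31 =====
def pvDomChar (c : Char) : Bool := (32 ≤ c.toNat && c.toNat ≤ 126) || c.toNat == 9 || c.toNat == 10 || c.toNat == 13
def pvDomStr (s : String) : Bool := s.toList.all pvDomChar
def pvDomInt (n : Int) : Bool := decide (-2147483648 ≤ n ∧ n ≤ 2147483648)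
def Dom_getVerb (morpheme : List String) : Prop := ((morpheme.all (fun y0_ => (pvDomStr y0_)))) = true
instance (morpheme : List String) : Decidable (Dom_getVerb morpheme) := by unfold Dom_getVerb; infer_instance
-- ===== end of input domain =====

-- B replaces A's three reversed scans by one forward pass tracking the last match per tag (simpler decomposition, same results).

-- ===== PORT A =====
-- 'for v in reversed(morpheme): if sub in v: return v' — first match over the reversed list, none if the loop falls through
def pvLoopA (sub : String) : List String → Option String
  | [] => none
  | v :: rest => if PySem.Str.isIn sub v then some v else pvLoopA sub rest

def getVerb (morpheme : List String) : String :=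
  match pvLoopA "VV" morpheme.reverse with
  | some v => v
  | none =>
    match pvLoopA "VA" morpheme.reverse with
    | some v => v
    | none =>
      match pvLoopA "V" morpheme.reverse with
      | some v => v
      | none => ""

-- ===== PORT B =====
-- one forward pass over morpheme keeping (last_vv, last_va, last_v)
def pvStepB (s : String × String × String) (x : String) : String × String × String :=
  (if PySem.Str.isIn "VV" x then x else s.1,
   if PySem.Str.isIn "VA" x then x else s.2.1,
   if PySem.Str.isIn "V" x then x else s.2.2)

def getVerb_alt (morpheme : List String) : String :=
  let s := morpheme.foldl pvStepB ("", "", "")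
  if s.1 ≠ "" then s.1 else if s.2.1 ≠ "" then s.2.1 else s.2.2

-- ===== PRECONDITION & SPEC =====
def Spec_getVerb (morpheme : List String) (out : String) : Prop := out = getVerb_alt morpheme
instance (morpheme : List String) (out : String) : Decidable (Spec_getVerb morpheme out) := by unfold Spec_getVerb; infer_instance

-- ===== CLAIM (what is proved, stated in full; the proofs are below) =====
def Claim_equal_getVerb : Prop := ∀ (morpheme : List String), Dom_getVerb morpheme → Spec_getVerb morpheme (getVerb morpheme)

-- ===== LEMMAS AND PROOFS =====

theorem pvLoopA_append (sub : String) (a b : List String) :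
    pvLoopA sub (a ++ b) =
      match pvLoopA sub a with
      | some v => some v
      | none => pvLoopA sub b := by
  induction a with
  | nil => simp [pvLoopA]
  | cons x xs ih =>
    simp only [List.cons_append, pvLoopA]
    split_ifs <;> simp [ih]

theorem pvLoopA_mem_isIn (sub : String) (l : List String) (v : String)
    (h : pvLoopA sub l = some v) : PySem.Str.isIn sub v = true := by
  induction l with
  | nil => simp [pvLoopA] at h
  | cons x xs ih =>
    simp only [pvLoopA] at h
    split_ifs at h with hx
    · cases h; exact hx
    · exact ih h

theorem isIn_ne_empty {sub v : String} (hs : PySem.Str.isIn sub "" = false)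
    (h : PySem.Str.isIn sub v = true) : v ≠ "" := by
  intro hv
  subst hv
  rw [h] at hs
  simp at hs

-- the fold's three components are exactly the three reversed first-match scans (over any init)
theorem pvFold_char (l : List String) (s : String × String × String) :
    (l.foldl pvStepB s).1 = (match pvLoopA "VV" l.reverse with | some v => v | none => s.1) ∧
    (l.foldl pvStepB s).2.1 = (match pvLoopA "VA" l.reverse with | some v => v | none => s.2.1) ∧
    (l.foldl pvStepB s).2.2 = (match pvLoopA "V" l.reverse with | some v => v | none => s.2.2) := by
  induction l generalizing s with
  | nil => simp [pvLoopA]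
  | cons x xs ih =>
    obtain ⟨h1, h2, h3⟩ := ih (pvStepB s x)
    refine ⟨?_, ?_, ?_⟩ <;>
      simp only [List.foldl_cons, List.reverse_cons, pvLoopA_append, pvStepB,
        pvLoopA] <;>
      rcases hvv : pvLoopA "VV" xs.reverse with _ | v <;>
      rcases hva : pvLoopA "VA" xs.reverse with _ | w <;>
      rcases hv : pvLoopA "V" xs.reverse with _ | u <;>
      split_ifs <;> simp_all

theorem getVerb_eq_alt (morpheme : List String) : getVerb morpheme = getVerb_alt morpheme := by
  obtain ⟨h1, h2, h3⟩ := pvFold_char morpheme ("", "", "")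
  unfold getVerb getVerb_alt
  rcases hvv : pvLoopA "VV" morpheme.reverse with _ | v
  · rcases hva : pvLoopA "VA" morpheme.reverse with _ | w
    · rcases hv : pvLoopA "V" morpheme.reverse with _ | u
      · simp_all
      · have hu := isIn_ne_empty (by decide) (pvLoopA_mem_isIn _ _ _ hv)
        simp_all
    · have hw := isIn_ne_empty (by decide) (pvLoopA_mem_isIn _ _ _ hva)
      simp_all
  · have hv' := isIn_ne_empty (by decide) (pvLoopA_mem_isIn _ _ _ hvv)
    simp_all

-- ===== VERDICT (by name: the statement is the Claim_ definition above) =====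
theorem getVerb_spec : Claim_equal_getVerb := by
  intro morpheme _
  unfold Spec_getVerb
  exact getVerb_eq_alt morpheme
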